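-- pv_equiv track=rewrite | github.com/naqushab/ScalerAcademy | Scaler/Advanced/Bit Manipulation - I/HW1.py | solve
-- ===== SOURCE A (Python) =====
-- def solve(A):
--     x = 0
--     for n in A:
--         x ^= n
--     if x%2==0:
--         return 'Yes'
--     else:
--         return 'No'
-- ===== SOURCE B (Python) =====
-- def _parity(A, lo, hi):
--     # parity (True = odd count) of odd elements in A[lo:hi], by divide and conquer
--     if hi - lo == 0:
--         return False
--     if hi - lo == 1:
--         return (A[lo] & 1) == 1
--     mid = (lo + hi) // 2
--     return _parity(A, lo, mid) != _parity(A, mid, hi)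
--
-- def solve(A):
--     return 'No' if _parity(A, 0, len(A)) else 'Yes'
-- ===== Notes on version B (the rewrite author's own statement) =====
-- stated objective: alternative
-- what changed: B replaces the left-to-right XOR accumulation with a recursive divide-and-conquer over index ranges: it halves [lo,hi), computes the parity of odd elements in each half, and combines with boolean !=; correct because only the low bit of the XOR decides the answer and parity is associative.
import Mathlib
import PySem

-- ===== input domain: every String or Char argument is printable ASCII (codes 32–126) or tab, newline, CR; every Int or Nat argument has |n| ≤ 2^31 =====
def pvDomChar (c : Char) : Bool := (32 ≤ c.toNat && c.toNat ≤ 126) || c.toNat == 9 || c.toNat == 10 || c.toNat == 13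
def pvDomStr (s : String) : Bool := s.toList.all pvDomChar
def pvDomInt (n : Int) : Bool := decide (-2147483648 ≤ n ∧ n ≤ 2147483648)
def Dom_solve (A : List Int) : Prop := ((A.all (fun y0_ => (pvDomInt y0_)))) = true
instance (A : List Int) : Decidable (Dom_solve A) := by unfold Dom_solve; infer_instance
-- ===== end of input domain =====

-- B: divide-and-conquer parity of the odd elements of A[lo:hi] instead of A's linear XOR fold.

-- ===== PORT A =====
def solve (A : List Int) : String :=
  let x := A.foldl (fun x n => PySem.Int.bxor x n) 0
  if PySem.Int.mod x 2 = 0 then "Yes" else "No"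

-- ===== PORT B =====
-- parity (true = odd count) of odd elements in A[lo:hi], by halving.
-- The first guard is 'hi - lo ≤ 0' rather than Python's '== 0' only to make the
-- recursion total; solve only calls it with 0 ≤ lo ≤ hi, where they coincide.
-- 'mid = (lo+hi)//2' is written inline (twice); A[lo] is always in range on these
-- calls, so pyGetD's default 0 is never used.
def parityRec (A : List Int) (lo hi : Int) : Bool :=
  if hi - lo ≤ 0 then false
  else if hi - lo = 1 then PySem.Int.band (PySem.List.pyGetD A lo 0) 1 = 1
  else
    parityRec A lo (PySem.Int.floordiv (lo + hi) 2)
      != parityRec A (PySem.Int.floordiv (lo + hi) 2) hi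
termination_by (hi - lo).toNat
decreasing_by
  · have h2 : lo + 1 ≤ PySem.Int.floordiv (lo + hi) 2 := by
      rw [PySem.Int.le_floordiv_iff_mul_le (by omega)]; omega
    have h3 : PySem.Int.floordiv (lo + hi) 2 < hi := by
      rw [PySem.Int.floordiv_lt_iff_lt_mul (by omega)]; omega
    omega
  · have h2 : lo + 1 ≤ PySem.Int.floordiv (lo + hi) 2 := by
      rw [PySem.Int.le_floordiv_iff_mul_le (by omega)]; omega
    have h3 : PySem.Int.floordiv (lo + hi) 2 < hi := by
      rw [PySem.Int.floordiv_lt_iff_lt_mul (by omega)]; omega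
    omega

def solve_alt (A : List Int) : String :=
  if parityRec A 0 A.length then "No" else "Yes"

-- ===== PRECONDITION & SPEC =====
def Spec_solve (A : List Int) (out : String) : Prop := out = solve_alt A
instance (A : List Int) (out : String) : Decidable (Spec_solve A out) := by unfold Spec_solve; infer_instance

-- ===== CLAIM (what is proved, stated in full; the proofs are below) =====
def Claim_equal_solve : Prop := ∀ (A : List Int), Dom_solve A → Spec_solve A (solve A)

-- ===== LEMMAS AND PROOFS =====

-- the odd-elements predicate both sides are compared through
def pvOddb (n : Int) : Bool := n % 2 = 1

-- A-side: parity of the XOR fold is the parity of the count of odd elements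
theorem pv_bxor_parity (a b : Int) :
    (PySem.Int.bxor a b) % 2 = (a + b) % 2 := by
  unfold PySem.Int.bxor
  split_ifs with h1 h2 h2
  · have h := Nat.xor_mod_two_eq (m := a.toNat) (n := b.toNat); omega
  · have h := Nat.xor_mod_two_eq (m := a.toNat) (n := (-b - 1).toNat); omega
  · have h := Nat.xor_mod_two_eq (m := (-a - 1).toNat) (n := b.toNat); omega
  · have h := Nat.xor_mod_two_eq (m := (-a - 1).toNat) (n := (-b - 1).toNat); omega

theorem pv_fold_parity (A : List Int) (x : Int) :
    (A.foldl (fun x n => PySem.Int.bxor x n) x) % 2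
      = (x + (A.countP pvOddb : Int)) % 2 := by
  induction A generalizing x with
  | nil => simp
  | cons a l ih =>
    simp only [List.foldl_cons, List.countP_cons]
    rw [ih]
    have h1 := pv_bxor_parity x a
    by_cases ha : pvOddb a = true
    · have : a % 2 = 1 := by simpa [pvOddb] using ha
      simp only [ha, if_pos]
      push_cast
      omega
    · rw [Bool.not_eq_true] at ha
      have hmod := Int.emod_two_eq a
      have h2 : ¬ (a % 2 = 1) := by simpa [pvOddb] using ha
      simp only [ha, Bool.false_eq_true, if_false]
      push_cast
      omega

-- B-side: parityRec computes the parity of the odd-element count of the segment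
theorem pv_parityRec_eq (k : Nat) :
    ∀ (A : List Int) (lo hi : Int), (hi - lo).toNat = k →
      0 ≤ lo → lo ≤ hi → hi ≤ A.length →
      parityRec A lo hi
        = decide ((((A.drop lo.toNat).take (hi - lo).toNat).countP pvOddb) % 2 = 1) := by
  induction k using Nat.strong_induction_on with
  | _ k ih =>
    intro A lo hi hk h0 hle hlen
    rw [parityRec]
    by_cases hz : hi - lo ≤ 0
    · rw [if_pos hz]
      have h00 : (hi - lo).toNat = 0 := by omega
      simp [h00]
    · by_cases h1 : hi - lo = 1
      · rw [if_neg hz, if_pos h1]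
        have hlt : lo.toNat < A.length := by omega
        have hto1 : (hi - lo).toNat = 1 := by omega
        have hdrop : A.drop lo.toNat = A[lo.toNat] :: A.drop (lo.toNat + 1) :=
          List.drop_eq_getElem_cons hlt
        rw [PySem.List.pyGetD_eq_getElem A 0 (by omega) (by omega), hto1, hdrop, List.take_succ_cons, List.take_zero]
        have hband : PySem.Int.band A[lo.toNat] 1 = A[lo.toNat] % 2 := by
          rw [PySem.Int.band_one, PySem.Int.mod_eq_emod_of_pos (by norm_num)]
        rw [hband]
        by_cases ho : pvOddb A[lo.toNat] = true
        · have : A[lo.toNat] % 2 = 1 := by simpa [pvOddb] using ho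
          simp [ho, this]
        · have hmod := Int.emod_two_eq A[lo.toNat]
          simp only [pvOddb, decide_eq_true_eq] at ho
          have : A[lo.toNat] % 2 = 0 := by omega
          simp [pvOddb, this]
      · rw [if_neg hz, if_neg h1]
        have h2 : lo + 2 ≤ hi := by omega
        generalize hmidE : PySem.Int.floordiv (lo + hi) 2 = mid
        have hmidlo : lo + 1 ≤ mid := by
          rw [← hmidE, PySem.Int.le_floordiv_iff_mul_le (by omega)]; omega
        have hmidhi : mid < hi := by
          rw [← hmidE, PySem.Int.floordiv_lt_iff_lt_mul (by omega)]; omega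
        have hb1 : (mid - lo).toNat < k := by omega
        have hb2 : (hi - mid).toNat < k := by omega
        have hm2 : mid ≤ (A.length : Int) := by omega
        rw [ih _ hb1 A lo mid rfl h0 (by omega) hm2,
            ih _ hb2 A mid hi rfl (by omega) (by omega) hlen]
        have hsplit :
            (A.drop lo.toNat).take (hi - lo).toNat
              = (A.drop lo.toNat).take (mid - lo).toNat
                ++ (A.drop mid.toNat).take (hi - mid).toNat := by
          have hadd : (hi - lo).toNat = (mid - lo).toNat + (hi - mid).toNat := by omega
          rw [hadd, List.take_add, List.drop_drop,
              show lo.toNat + (mid - lo).toNat = mid.toNat from by omega]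
        rw [hsplit, List.countP_append]
        set a := ((A.drop lo.toNat).take (mid - lo).toNat).countP pvOddb
        set b := ((A.drop mid.toNat).take (hi - mid).toNat).countP pvOddb
        by_cases pa : a % 2 = 1 <;> by_cases pb : b % 2 = 1 <;>
          simp [pa, pb] <;> omega

-- ===== VERDICT (by name: the statement is the Claim_ definition above) =====
theorem solve_spec : Claim_equal_solve := by
  intro A _
  unfold Spec_solve solve solve_alt
  have hB := pv_parityRec_eq _ A 0 A.length rfl (le_refl 0) (by positivity) (le_refl _)
  have hA := pv_fold_parity A 0
  rw [zero_add] at hA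
  simp only [Int.sub_zero, Int.toNat_natCast, Int.toNat_zero, List.drop_zero,
    List.take_length] at hB
  simp only [PySem.Int.mod_eq_emod_of_pos (show (0:Int) < 2 by norm_num), hA, hB]
  have hc := Int.emod_two_eq ((A.countP pvOddb : Int))
  by_cases hp : ((A.countP pvOddb : Int)) % 2 = 1
  · have h0 : ¬ ((A.countP pvOddb : Int)) % 2 = 0 := by omega
    have hn : (A.countP pvOddb : Nat) % 2 = 1 := by omega
    simp [hp, hn]
  · have h0 : ((A.countP pvOddb : Int)) % 2 = 0 := by omega
    have hn : ¬ ((A.countP pvOddb : Nat) % 2 = 1) := by omega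
    simp [h0, hn]
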